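-- pv_equiv track=rewrite | github.com/HuIsJason/CSCA08-Assignments | a3/tweets.py | most_popular
-- ===== SOURCE A (Python) =====
-- from typing import List, Dict, TextIO, Tuple
--
-- TWEET_DATE_INDEX = 1
--
-- TWEET_FAVOURITE_INDEX = 3
--
-- TWEET_RETWEET_INDEX = 4
--
-- def most_popular(tweets: Dict[str, List[tuple]], beginning: int, end: int) -> \
--     str:
--     """Return the most popular user in tweets, based on the sum of their \
--     favourite and retweet counts, in between the given date intervals.
--
--     Precondition: beginning and end are expressed in the same integer format as\
--     in the data file, and end >= beginning.
--
--     >>> d = {'jason': [('hello world!', 20171108132750, 'Twitter for Android', \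
--     1, 4)], 'jimmy': [('what is up?', 20171009122851, 'Twitter for iPhone', \
--     0, 3)]}
--     >>> most_popular(d, 20170000000000, 20190000000000)
--     'jason'
--     >>> L = {'Sasuke': [('acquired the Rinnegan today!', 20161009152362, \
--     'Twitter for Nintendo DS', 12, 10)], 'Madara': \
--     [('Revived the Juubi today!', 20160411143675, 'Twitter for TI-84', 8, 14)]}
--     >>> most_popular(L, 20160000152362, 20161109152362)
--     'tie'
--
--     """
--
--     user_to_pop = {}
--     pop_users = []
--     for username in tweets:
--         user_pop = []
--         for tup in tweets[username]:
--             # check if tweet's date is in given interval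
--             if beginning <= tup[TWEET_DATE_INDEX] <= end:
--                 user_pop.append(tup[TWEET_FAVOURITE_INDEX] + \
--                                 tup[TWEET_RETWEET_INDEX])
--         # sum their suitable popularity counts, refer it to user in a dict
--         user_to_pop[username] = sum(user_pop)
--     max_pop = max(user_to_pop.values())
--     # if user has the highest popularity, add it to list
--     for username in user_to_pop:
--         if user_to_pop[username] == max_pop:
--             pop_users.append(username)
--     if len(pop_users) == 1:
--         return pop_users[0]
--     else:
--         return 'tie'
-- ===== SOURCE B (Python) =====
-- def most_popular(tweets, beginning, end):
--     """Single pass: running best popularity and the list of users tied at it."""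
--     best = None
--     winners = []
--     for username, tups in tweets.items():
--         total = sum(t[3] + t[4] for t in tups if beginning <= t[1] <= end)
--         if best is None or total > best:
--             best = total
--             winners = [username]
--         elif total == best:
--             winners.append(username)
--     if len(winners) == 1:
--         return winners[0]
--     return 'tie'
-- ===== Notes on version B (the rewrite author's own statement) =====
-- stated objective: alternative
-- what changed: Replaces A's three phases (build a username-to-popularity dict, take max over its values, then re-scan the dict collecting users at that max) by a single pass over the users that maintains a running best value and the list of users tied at it.
-- crash fix: On the empty dict A's max() raises ValueError while B returns 'tie' (no single winner). — e.g. on most_popular([], 0, 0): A raises ValueError, B returns "tie"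
import Mathlib
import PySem

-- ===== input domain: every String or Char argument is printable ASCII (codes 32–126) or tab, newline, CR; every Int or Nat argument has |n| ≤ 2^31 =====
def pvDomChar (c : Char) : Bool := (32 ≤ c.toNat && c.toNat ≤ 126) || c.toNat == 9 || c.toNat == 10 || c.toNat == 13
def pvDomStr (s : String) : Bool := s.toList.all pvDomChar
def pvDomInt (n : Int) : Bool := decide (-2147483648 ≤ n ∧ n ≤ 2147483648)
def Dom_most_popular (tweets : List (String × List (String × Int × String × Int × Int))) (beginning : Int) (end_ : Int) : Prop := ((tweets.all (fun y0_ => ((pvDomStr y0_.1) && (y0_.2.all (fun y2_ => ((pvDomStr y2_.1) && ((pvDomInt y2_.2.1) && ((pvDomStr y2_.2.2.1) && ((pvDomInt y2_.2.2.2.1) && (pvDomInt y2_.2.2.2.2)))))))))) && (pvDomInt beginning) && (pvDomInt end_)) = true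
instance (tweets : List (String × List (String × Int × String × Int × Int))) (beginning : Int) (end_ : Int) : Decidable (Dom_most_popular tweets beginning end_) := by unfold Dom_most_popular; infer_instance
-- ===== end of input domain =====

-- B replaces A's three phases (dict of sums, max over values, re-scan for ties) by one
-- pass keeping a running best and the users tied at it; objective: alternative decomposition.

-- ===== PORT A =====
-- 'for username in tweets: … tweets[username] …' iterates the dict's entries; under
-- Pre_ the keys are distinct, so the entry's own value is the lookup result.
def most_popular (tweets : List (String × List (String × Int × String × Int × Int))) (beginning : Int) (end_ : Int) : String :=
  let user_to_pop : PySem.Dict String Int :=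
    tweets.foldl (fun d p =>
      let user_pop : List Int :=
        p.2.foldl (fun acc tup =>
          if beginning ≤ tup.2.1 ∧ tup.2.1 ≤ end_ then
            acc ++ [tup.2.2.2.1 + tup.2.2.2.2]
          else acc) []
      d.insert p.1 user_pop.sum) PySem.Dict.empty
  match PySem.List.max? user_to_pop.values (fun x => x) with
  | none => ""   -- max() raises ValueError on the empty dict: excluded by Pre_
  | some max_pop =>
    let pop_users : List String :=
      user_to_pop.items.foldl (fun acc q =>
        if user_to_pop.getD q.1 0 = max_pop then acc ++ [q.1] else acc) []
    if pop_users.length = 1 then PySem.List.pyGetD pop_users 0 "" else "tie"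

-- ===== PORT B =====
def most_popular_alt (tweets : List (String × List (String × Int × String × Int × Int))) (beginning : Int) (end_ : Int) : String :=
  let step : (Option Int × List String) → (String × List (String × Int × String × Int × Int)) → (Option Int × List String) :=
    fun st p =>
      let total : Int :=
        ((p.2.filter (fun t => decide (beginning ≤ t.2.1 ∧ t.2.1 ≤ end_))).map
          (fun t => t.2.2.2.1 + t.2.2.2.2)).sum
      match st.1 with
      | none => (some total, [p.1])
      | some b =>
        if total > b then (some total, [p.1])
        else if total = b then (st.1, st.2 ++ [p.1])
        else st
  let r := tweets.foldl step (none, [])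
  if r.2.length = 1 then r.2.headD "tie" else "tie"

-- ===== PRECONDITION & SPEC =====
-- Pre_ excludes the empty dict, on which A's max() raises ValueError, and association
-- lists with duplicate usernames, which do not represent a Python dict (a dict's keys
-- are unique; a duplicated list collapses before either program sees it).
def Pre_most_popular (tweets : List (String × List (String × Int × String × Int × Int))) (beginning : Int) (end_ : Int) : Prop :=
  tweets ≠ [] ∧ (tweets.map Prod.fst).Nodup
instance (tweets : List (String × List (String × Int × String × Int × Int))) (beginning : Int) (end_ : Int) : Decidable (Pre_most_popular tweets beginning end_) := by unfold Pre_most_popular; infer_instance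
def pvWitness_most_popular : (List (String × List (String × Int × String × Int × Int))) × Int × Int :=
  ([("jason", [("hi", 5, "web", 1, 4)]), ("jimmy", [("yo", 9, "web", 0, 3)])], 0, 10)

-- On the empty dict A's max() raises ValueError while B returns 'tie' (no single winner).
def Raises_most_popular (tweets : List (String × List (String × Int × String × Int × Int))) (beginning : Int) (end_ : Int) : Prop :=
  tweets = []
instance (tweets : List (String × List (String × Int × String × Int × Int))) (beginning : Int) (end_ : Int) : Decidable (Raises_most_popular tweets beginning end_) := by unfold Raises_most_popular; infer_instance
def pvRaiseWitness_most_popular : (List (String × List (String × Int × String × Int × Int))) × Int × Int := ([], 0, 0)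
def pvRaiseWitnessOut_most_popular : String := "tie"

def Spec_most_popular (tweets : List (String × List (String × Int × String × Int × Int))) (beginning : Int) (end_ : Int) (out : String) : Prop := out = most_popular_alt tweets beginning end_
instance (tweets : List (String × List (String × Int × String × Int × Int))) (beginning : Int) (end_ : Int) (out : String) : Decidable (Spec_most_popular tweets beginning end_ out) := by unfold Spec_most_popular; infer_instance

-- ===== CLAIM (what is proved, stated in full; the proofs are below) =====
def Claim_equal_most_popular : Prop := ∀ (tweets : List (String × List (String × Int × String × Int × Int))) (beginning : Int) (end_ : Int), Dom_most_popular tweets beginning end_ → Pre_most_popular tweets beginning end_ → Spec_most_popular tweets beginning end_ (most_popular tweets beginning end_)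
def Claim_raises_most_popular : Prop := (∀ (tweets : List (String × List (String × Int × String × Int × Int))) (beginning : Int) (end_ : Int), Dom_most_popular tweets beginning end_ → Raises_most_popular tweets beginning end_ → ¬ Pre_most_popular tweets beginning end_) ∧ (Dom_most_popular (pvRaiseWitness_most_popular.1) (pvRaiseWitness_most_popular.2.1) (pvRaiseWitness_most_popular.2.2) ∧ Raises_most_popular (pvRaiseWitness_most_popular.1) (pvRaiseWitness_most_popular.2.1) (pvRaiseWitness_most_popular.2.2) ∧ most_popular_alt (pvRaiseWitness_most_popular.1) (pvRaiseWitness_most_popular.2.1) (pvRaiseWitness_most_popular.2.2) = pvRaiseWitnessOut_most_popular)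


-- ===== LEMMAS AND PROOFS =====

-- shared vocabulary: date test, popularity score, one user's date-filtered total
def pvC (b e : Int) (t : String × Int × String × Int × Int) : Bool :=
  decide (b ≤ t.2.1 ∧ t.2.1 ≤ e)

def pvF (t : String × Int × String × Int × Int) : Int := t.2.2.2.1 + t.2.2.2.2

def pvTotal (b e : Int) (p : String × List (String × Int × String × Int × Int)) : Int :=
  ((p.2.filter (pvC b e)).map pvF).sum

-- B's loop body on a (username, total) pair
def pvBstep (st : Option Int × List String) (q : String × Int) : Option Int × List String :=
  match st.1 with
  | none => (some q.2, [q.1])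
  | some b =>
    if q.2 > b then (some q.2, [q.1])
    else if q.2 = b then (st.1, st.2 ++ [q.1])
    else st

-- A's inner 'user_pop' loop is filter-then-map
theorem pv_inner (b e : Int) (tups : List (String × Int × String × Int × Int)) :
    tups.foldl (fun acc tup =>
      if b ≤ tup.2.1 ∧ tup.2.1 ≤ e then acc ++ [tup.2.2.2.1 + tup.2.2.2.2] else acc) [] =
    (tups.filter (pvC b e)).map pvF := by
  have h := PySem.List.foldl_append_if (pvC b e) pvF tups []
  simpa [pvC, pvF] using h

-- A's 'pop_users' loop is filter-then-map
theorem pv_filter_fold (M : Int) (L : List (String × Int)) :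
    L.foldl (fun acc x => if x.2 = M then acc ++ [x.1] else acc) [] =
    (L.filter (fun x => decide (x.2 = M))).map Prod.fst := by
  have h := PySem.List.foldl_append_if (fun x : String × Int => decide (x.2 = M)) Prod.fst L []
  simpa using h

-- port B, as a fold of pvBstep over (username, total) pairs
theorem pv_alt_shape (b e : Int) (tweets : List (String × List (String × Int × String × Int × Int))) :
    most_popular_alt tweets b e =
      (if ((tweets.map (fun p => (p.1, pvTotal b e p))).foldl pvBstep (none, [])).2.length = 1
       then ((tweets.map (fun p => (p.1, pvTotal b e p))).foldl pvBstep (none, [])).2.headD "tie"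
       else "tie") := by
  simp only [most_popular_alt, List.foldl_map]
  rfl

-- running-max/tie invariant of B's loop, started from a known best
theorem pv_brun (L : List (String × Int)) (b : Int) (w : List String) :
    L.foldl pvBstep (some b, w) =
      (some (List.foldl max b (L.map Prod.snd)),
       (if b = List.foldl max b (L.map Prod.snd) then w else []) ++
         (L.filter (fun q => decide (q.2 = List.foldl max b (L.map Prod.snd)))).map Prod.fst) := by
  induction L generalizing b w with
  | nil => simp
  | cons q t ih =>
    simp only [List.foldl_cons, List.map_cons, List.filter_cons]
    by_cases h1 : q.2 > b
    · have hb : max b q.2 = q.2 := max_eq_right (le_of_lt h1)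
      simp only [hb]
      have hbase := (PySem.List.le_foldl_max (t.map Prod.snd) q.2).1
      have hbM : ¬ b = List.foldl max q.2 (t.map Prod.snd) := by omega
      have hstep : pvBstep (some b, w) q = (some q.2, [q.1]) := by
        show (if q.2 > b then (some q.2, [q.1])
              else if q.2 = b then (some b, w ++ [q.1]) else (some b, w)) = _
        rw [if_pos h1]
      rw [hstep, ih]
      by_cases h2 : q.2 = List.foldl max q.2 (t.map Prod.snd)
      · simp [decide_eq_true_eq, if_pos h2, if_neg hbM]
      · simp [decide_eq_true_eq, if_neg h2, if_neg hbM]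
    · have hb : max b q.2 = b := max_eq_left (by omega)
      simp only [hb]
      by_cases h2 : q.2 = b
      · have hstep : pvBstep (some b, w) q = (some b, w ++ [q.1]) := by
          show (if q.2 > b then (some q.2, [q.1])
                else if q.2 = b then (some b, w ++ [q.1]) else (some b, w)) = _
          rw [if_neg h1, if_pos h2]
        rw [hstep, ih]
        by_cases h3 : b = List.foldl max b (t.map Prod.snd)
        · simp [decide_eq_true_eq, if_pos h3, if_pos (h2.trans h3)]
        · have hq2F : ¬ q.2 = List.foldl max b (t.map Prod.snd) := h2 ▸ h3
          simp [decide_eq_true_eq, if_neg h3, if_neg hq2F]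
      · have hstep : pvBstep (some b, w) q = (some b, w) := by
          show (if q.2 > b then (some q.2, [q.1])
                else if q.2 = b then (some b, w ++ [q.1]) else (some b, w)) = _
          rw [if_neg h1, if_neg h2]
        have hbase := (PySem.List.le_foldl_max (t.map Prod.snd) b).1
        have hqM : ¬ q.2 = List.foldl max b (t.map Prod.snd) := by omega
        rw [hstep, ih]
        simp [hqM]

-- ===== VERDICT (by name: the statement is the Claim_ definition above) =====
theorem most_popular_spec : Claim_equal_most_popular := by
  intro tweets beginning end_ _ hpre
  obtain ⟨hne, hnd⟩ := hpre
  obtain ⟨q, rest, rfl⟩ := List.exists_cons_of_ne_nil hne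
  unfold Spec_most_popular
  rw [pv_alt_shape]
  simp only [most_popular, pv_inner]
  set D := (q :: rest).foldl
      (fun d p => d.insert p.1 (List.map pvF (List.filter (pvC beginning end_) p.2)).sum)
      PySem.Dict.empty with hD
  have hDalt : D = (q :: rest).foldl
      (fun d p => d.insert p.1 (pvTotal beginning end_ p)) PySem.Dict.empty := rfl
  have hfresh : ∀ a ∈ q :: rest,
      (PySem.Dict.empty : PySem.Dict String Int).contains a.1 = false :=
    fun a _ => PySem.Dict.contains_empty a.1
  have hitems : D.items = (q :: rest).map (fun p => (p.1, pvTotal beginning end_ p)) := by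
    rw [hDalt]
    have h := PySem.Dict.items_foldl_insert_fresh (q :: rest) Prod.fst
      (fun p => pvTotal beginning end_ p) PySem.Dict.empty hfresh hnd
    simpa using h
  have hkeys : D.keys.Nodup := by
    simp only [PySem.Dict.keys, hitems, List.map_map]
    simpa [Function.comp] using hnd
  have hvals : D.values =
      pvTotal beginning end_ q :: rest.map (fun p => pvTotal beginning end_ p) := by
    simp [PySem.Dict.values, hitems, List.map_map, Function.comp]
  rcases hmax : PySem.List.max? D.values (fun x => x) with _ | M
  · rw [hvals] at hmax
    simp [PySem.List.max?_eq_none_iff] at hmax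
  · rw [hvals, PySem.List.max?_id_cons] at hmax
    have hMval : List.foldl max (pvTotal beginning end_ q)
        (rest.map (fun p => pvTotal beginning end_ p)) = M := by
      injection hmax
    dsimp only
    -- A's collection loop, lookups replaced by the stored value
    have hcongr :
        D.items.foldl (fun acc x => if D.getD x.1 0 = M then acc ++ [x.1] else acc) [] =
        D.items.foldl (fun acc x => if x.2 = M then acc ++ [x.1] else acc) [] := by
      apply PySem.List.foldl_congr_mem
      intro acc x hx
      have hg : D.getD x.1 0 = x.2 :=
        PySem.Dict.getD_of_mem_items D (by simpa using hx) hkeys 0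
      rw [hg]
    rw [hcongr, hitems, pv_filter_fold]
    -- B's loop via the invariant
    have hBM : ((rest.map (fun p => (p.1, pvTotal beginning end_ p))).map Prod.snd) =
        rest.map (fun p => pvTotal beginning end_ p) := by
      simp [List.map_map, Function.comp]
    simp only [List.map_cons, List.foldl_cons]
    have hstep0 : pvBstep (none, []) (q.1, pvTotal beginning end_ q) =
        (some (pvTotal beginning end_ q), [q.1]) := rfl
    rw [hstep0, pv_brun, hBM, hMval]
    simp only [List.filter_cons]
    by_cases hq : pvTotal beginning end_ q = M
    · simp only [hq, decide_true, if_true, List.map_cons]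
      set W := ((rest.map (fun p => (p.1, pvTotal beginning end_ p))).filter
        (fun x => decide (x.2 = M))).map Prod.fst with hW
      by_cases hl : (q.1 :: W).length = 1
      · have hWnil : W = [] := by
          simp only [List.length_cons] at hl
          exact List.eq_nil_of_length_eq_zero (by omega)
        simp [hWnil, PySem.List.pyGetD, PySem.List.pyGet?, PySem.List.pyIdx?]
      · simp
    · simp only [hq, decide_false, Bool.false_eq_true, if_false, List.nil_append]
      set W := ((rest.map (fun p => (p.1, pvTotal beginning end_ p))).filter
        (fun x => decide (x.2 = M))).map Prod.fst with hW
      by_cases hl : W.length = 1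
      · obtain ⟨u, hu⟩ := List.length_eq_one_iff.mp hl
        simp [hu, PySem.List.pyGetD, PySem.List.pyGet?, PySem.List.pyIdx?]
      · simp [hl]

theorem most_popular_raises : Claim_raises_most_popular := by
  unfold Claim_raises_most_popular
  exact ⟨fun t b e _ h hp => hp.1 h, by decide⟩

-- self-check: the raise witness really lies in Raises_ (projected from the raises theorem)
theorem pv_raise_witness_ok :
    Raises_most_popular pvRaiseWitness_most_popular.1 pvRaiseWitness_most_popular.2.1
      pvRaiseWitness_most_popular.2.2 := by
  have h := most_popular_raises
  unfold Claim_raises_most_popular at h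
  exact h.2.2.1
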